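-- pv_equiv track=rewrite | github.com/osks/pymarkdoc | markdocpy/utils.py | find_tag_end
-- ===== SOURCE A (Python) =====
-- def find_tag_end(content: str, start: int = 0) -> int | None:
--     state = "normal"
--     pos = start
--     while pos < len(content):
--         char = content[pos]
--         if state == "string":
--             if char == "\\":
--                 state = "escape"
--             elif char == '"':
--                 state = "normal"
--         elif state == "escape":
--             state = "string"
--         else:
--             if char == '"':
--                 state = "string"
--             elif content.startswith("%}", pos):
--                 return pos
--         pos += 1
--     return None
-- ===== SOURCE B (Python) =====
-- def find_tag_end(content: str, start: int = 0) -> int | None: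
--     n = len(content)
--     pos = start
--     while pos < n:
--         if content.startswith('"', pos):
--             pos += 1
--             while pos < n:
--                 c = content[pos]
--                 if c == "\\":
--                     pos += 2
--                 elif c == '"':
--                     pos += 1
--                     break
--                 else:
--                     pos += 1
--         elif content.startswith("%}", pos):
--             return pos
--         else:
--             pos += 1
--     return None
-- ===== Notes on version B (the rewrite author's own statement) =====
-- stated objective: alternative
-- what changed: Replaces A's flat three-state (normal/string/escape) character state machine with an outer tag-scan loop containing an inner loop that consumes a whole string literal (advancing by 2 over backslash escapes), so no state variable is carried.
import Mathlib
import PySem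

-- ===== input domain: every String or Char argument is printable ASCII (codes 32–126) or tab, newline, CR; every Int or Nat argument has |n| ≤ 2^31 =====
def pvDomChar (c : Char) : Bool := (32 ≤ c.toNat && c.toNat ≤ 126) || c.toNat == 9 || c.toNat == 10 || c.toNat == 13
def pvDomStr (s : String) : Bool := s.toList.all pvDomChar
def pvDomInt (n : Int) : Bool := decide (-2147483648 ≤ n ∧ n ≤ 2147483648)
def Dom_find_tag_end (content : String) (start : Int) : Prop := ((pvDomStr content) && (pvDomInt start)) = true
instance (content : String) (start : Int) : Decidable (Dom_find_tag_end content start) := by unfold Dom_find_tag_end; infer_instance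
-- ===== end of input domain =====

-- B replaces A's three-state escape machine by an outer scan with an inner string-literal-skipping
-- loop (objective: alternative decomposition, same linear cost).
-- The `fuel` parameters below are totality bookkeeping only: fuel starts at the number of remaining
-- positions and each loop iteration advances `pos` by at least 1, so fuel never runs out early.

-- content.startswith(pfx, pos): Python semantics, exact incl. negative-start clamping to max(len+pos, 0)
def pyStartswithAt (cs : List Char) (pfx : List Char) (pos : Int) : Bool :=
  let i : Int := if pos < 0 then max ((cs.length : Int) + pos) 0 else pos
  decide ((cs.drop i.toNat).take pfx.length = pfx)

-- ===== PORT A =====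
def find_tag_end_go (cs : List Char) (fuel : Nat) (state : String) (pos : Int) : Option Int :=
  match fuel with
  | 0 => none
  | fuel + 1 =>
    if pos < (cs.length : Int) then
      match PySem.List.pyGet? cs pos with
      | none => none  -- Python raises IndexError here (pos < -len); outside Pre_
      | some char =>
        if state = "string" then
          find_tag_end_go cs fuel (if char = '\\' then "escape" else if char = '"' then "normal" else "string") (pos + 1)
        else if state = "escape" then
          find_tag_end_go cs fuel "string" (pos + 1)
        else
          if char = '"' then find_tag_end_go cs fuel "string" (pos + 1)
          else if pyStartswithAt cs ['%', '}'] pos then some pos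
          else find_tag_end_go cs fuel "normal" (pos + 1)
    else none

def find_tag_end (content : String) (start : Int) : Option Int :=
  find_tag_end_go content.toList ((content.toList.length : Int) - start).toNat "normal" start

-- ===== PORT B =====
-- B's inner loop: consume a string literal (opening quote already consumed), return new pos
def skipString (cs : List Char) (fuel : Nat) (pos : Int) : Int :=
  match fuel with
  | 0 => pos
  | fuel + 1 =>
    if pos < (cs.length : Int) then
      match PySem.List.pyGet? cs pos with
      | none => pos  -- Python raises IndexError here (pos < -len); outside Pre_
      | some c =>
        if c = '\\' then skipString cs fuel (pos + 2)
        else if c = '"' then pos + 1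
        else skipString cs fuel (pos + 1)
    else pos

def altGo (cs : List Char) (fuel : Nat) (pos : Int) : Option Int :=
  match fuel with
  | 0 => none
  | fuel + 1 =>
    if pos < (cs.length : Int) then
      if pyStartswithAt cs ['"'] pos then altGo cs fuel (skipString cs fuel (pos + 1))
      else if pyStartswithAt cs ['%', '}'] pos then some pos
      else altGo cs fuel (pos + 1)
    else none

def find_tag_end_alt (content : String) (start : Int) : Option Int :=
  altGo content.toList ((content.toList.length : Int) - start).toNat start

-- ===== PRECONDITION & SPEC =====
-- Pre_ excludes exactly the inputs on which A raises IndexError (start < -len(content)).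
def Pre_find_tag_end (content : String) (start : Int) : Prop := -(content.toList.length : Int) ≤ start
instance (content : String) (start : Int) : Decidable (Pre_find_tag_end content start) := by unfold Pre_find_tag_end; infer_instance

def pvWitness_find_tag_end : String × Int := ("{% if \"a%}b\" %} tail", 0)

def Spec_find_tag_end (content : String) (start : Int) (out : Option Int) : Prop := out = find_tag_end_alt content start
instance (content : String) (start : Int) (out : Option Int) : Decidable (Spec_find_tag_end content start out) := by unfold Spec_find_tag_end; infer_instance

-- ===== CLAIM =====
def Claim_equal_find_tag_end : Prop := ∀ (content : String) (start : Int), Dom_find_tag_end content start → Pre_find_tag_end content start → Spec_find_tag_end content start (find_tag_end content start)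

-- ===== LEMMAS AND PROOFS =====

-- Python's content[pos] for -len ≤ pos < len: the effective nonnegative index
theorem pyGet?_eff (cs : List Char) (pos : Int)
    (h0 : -(cs.length : Int) ≤ pos) (h1 : pos < (cs.length : Int)) :
    PySem.List.pyGet? cs pos = cs[(if pos < 0 then (cs.length : Int) + pos else pos).toNat]? := by
  simp only [PySem.List.pyGet?, PySem.List.pyIdx?]
  by_cases hp : 0 ≤ pos
  · simp only [hp, if_pos, h1, Option.bind_some]
    rw [if_neg (by omega : ¬ pos < 0)]
  · rw [if_neg hp, if_pos h0, Option.bind_some, if_pos (by omega : pos < 0)]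
    congr 1
    omega

theorem startswithAt_single (cs : List Char) (pos : Int) (c : Char)
    (h0 : -(cs.length : Int) ≤ pos) (h1 : pos < (cs.length : Int)) :
    pyStartswithAt cs [c] pos = true ↔ PySem.List.pyGet? cs pos = some c := by
  rw [pyGet?_eff cs pos h0 h1]
  have hlen : (if pos < 0 then (cs.length : Int) + pos else pos).toNat < cs.length := by
    split <;> omega
  have hi : (if pos < 0 then max ((cs.length : Int) + pos) 0 else pos).toNat
      = (if pos < 0 then (cs.length : Int) + pos else pos).toNat := by
    by_cases hp : pos < 0 <;> simp [hp] <;> omega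
  show decide ((cs.drop (if pos < 0 then max ((cs.length : Int) + pos) 0 else pos).toNat).take ([c].length) = [c]) = true ↔ _
  rw [hi]
  have hdrop : cs.drop (if pos < 0 then (cs.length : Int) + pos else pos).toNat
      = cs[(if pos < 0 then (cs.length : Int) + pos else pos).toNat] ::
        cs.drop ((if pos < 0 then (cs.length : Int) + pos else pos).toNat + 1) :=
    List.drop_eq_getElem_cons hlen
  simp only [hdrop, List.length_cons, List.length_nil, List.take_succ_cons, List.take_zero,
    List.getElem?_eq_getElem hlen, decide_eq_true_eq, List.cons.injEq, and_true, Option.some.injEq]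

theorem skipString_ge (cs : List Char) (fuel : Nat) (pos : Int) : pos ≤ skipString cs fuel pos := by
  induction fuel generalizing pos with
  | zero => simp [skipString]
  | succ f ih =>
    rw [skipString]
    split
    · cases hg : PySem.List.pyGet? cs pos with
      | none => simp
      | some c =>
        simp only
        split
        · have := ih (pos + 2); omega
        · split
          · omega
          · have := ih (pos + 1); omega
    · omega

theorem skipString_irrel (cs : List Char) (f g : Nat) (pos : Int)
    (hf : ((cs.length : Int) - pos).toNat ≤ f) (hg : ((cs.length : Int) - pos).toNat ≤ g) :
    skipString cs f pos = skipString cs g pos := by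
  induction f generalizing g pos with
  | zero =>
    have hge : ¬ pos < (cs.length : Int) := by omega
    cases g with
    | zero => rfl
    | succ g' => rw [skipString, skipString, if_neg hge]
  | succ f' ih =>
    cases g with
    | zero =>
      have hge : ¬ pos < (cs.length : Int) := by omega
      rw [skipString, skipString, if_neg hge]
    | succ g' =>
      rw [skipString, skipString]
      split
      · rename_i hlt
        cases hc : PySem.List.pyGet? cs pos with
        | none => rfl
        | some c =>
          simp only
          split
          · exact ih g' (pos + 2) (by omega) (by omega)
          · split
            · rfl
            · exact ih g' (pos + 1) (by omega) (by omega)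
      · rfl

theorem altGo_irrel (cs : List Char) (f g : Nat) (pos : Int)
    (hf : ((cs.length : Int) - pos).toNat ≤ f) (hg : ((cs.length : Int) - pos).toNat ≤ g) :
    altGo cs f pos = altGo cs g pos := by
  induction f generalizing g pos with
  | zero =>
    have hge : ¬ pos < (cs.length : Int) := by omega
    cases g with
    | zero => rfl
    | succ g' => rw [altGo, altGo, if_neg hge]
  | succ f' ih =>
    cases g with
    | zero =>
      have hge : ¬ pos < (cs.length : Int) := by omega
      rw [altGo, altGo, if_neg hge]
    | succ g' =>
      rw [altGo, altGo]
      split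
      · rename_i hlt
        split
        · have hskip : skipString cs f' (pos + 1) = skipString cs g' (pos + 1) :=
            skipString_irrel cs f' g' (pos + 1) (by omega) (by omega)
          rw [hskip]
          have hge1 := skipString_ge cs g' (pos + 1)
          exact ih g' (skipString cs g' (pos + 1)) (by omega) (by omega)
        · split
          · rfl
          · exact ih g' (pos + 1) (by omega) (by omega)
      · rfl

theorem main_equiv (cs : List Char) (fuel : Nat) (pos : Int) (hpos : -(cs.length : Int) ≤ pos)
    (hfuel : ((cs.length : Int) - pos).toNat ≤ fuel) :
    find_tag_end_go cs fuel "normal" pos = altGo cs fuel pos ∧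
    find_tag_end_go cs fuel "string" pos = altGo cs fuel (skipString cs fuel pos) ∧
    find_tag_end_go cs fuel "escape" pos = altGo cs fuel (skipString cs fuel (pos + 1)) := by
  induction fuel generalizing pos with
  | zero => exact ⟨rfl, rfl, rfl⟩
  | succ f ih =>
    by_cases hlt : pos < (cs.length : Int)
    · have hg : PySem.List.pyGet? cs pos
          = some (cs[(if pos < 0 then (cs.length : Int) + pos else pos).toNat]'(by split <;> omega)) := by
        rw [pyGet?_eff cs pos hpos hlt]; exact List.getElem?_eq_getElem (by split <;> omega)
      set ch := cs[(if pos < 0 then (cs.length : Int) + pos else pos).toNat]'(by split <;> omega) with hch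
      have ih1 := ih (pos + 1) (by omega) (by omega)
      refine ⟨?_, ?_, ?_⟩
      · -- normal state
        rw [find_tag_end_go, altGo]
        simp only [hlt, hg, if_pos]
        have hq := startswithAt_single cs pos '"' hpos hlt
        by_cases hc : ch = '"'
        · have hb : pyStartswithAt cs ['"'] pos = true := hq.mpr (by rw [hg, hc])
          simp [hc, hb]
          exact ih1.2.1
        · have hb : pyStartswithAt cs ['"'] pos = false := by
            by_contra hcon
            have := hq.mp (by simpa using hcon)
            rw [hg] at this; exact hc (by injection this)
          simp [hc, hb]
          split
          · rfl
          · exact ih1.1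
      · -- string state
        rw [find_tag_end_go, skipString]
        simp only [hlt, hg, if_pos]
        by_cases hc : ch = '\\'
        · simp [hc]
          have h22 := ih1.2.2
          rw [show pos + 1 + 1 = pos + 2 by ring] at h22
          rw [h22]
          have hge := skipString_ge cs f (pos + 2)
          exact altGo_irrel cs f (f + 1) (skipString cs f (pos + 2)) (by omega) (by omega)
        · by_cases hc2 : ch = '"'
          · simp [hc2]
            rw [ih1.1]
            exact altGo_irrel cs f (f + 1) (pos + 1) (by omega) (by omega)
          · simp [hc, hc2]
            rw [ih1.2.1]
            have hge := skipString_ge cs f (pos + 1)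
            exact altGo_irrel cs f (f + 1) (skipString cs f (pos + 1)) (by omega) (by omega)
      · -- escape state
        rw [find_tag_end_go]
        simp only [hlt, hg, if_pos]
        rw [ih1.2.1]
        have hirr : skipString cs (f + 1) (pos + 1) = skipString cs f (pos + 1) :=
          skipString_irrel cs (f + 1) f (pos + 1) (by omega) (by omega)
        rw [hirr]
        have hge := skipString_ge cs f (pos + 1)
        exact altGo_irrel cs f (f + 1) (skipString cs f (pos + 1)) (by omega) (by omega)
    · have hskip : skipString cs (f + 1) pos = pos := by rw [skipString, if_neg hlt]
      have hskip1 : skipString cs (f + 1) (pos + 1) = pos + 1 := by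
        rw [skipString, if_neg (by omega : ¬ pos + 1 < (cs.length : Int))]
      refine ⟨?_, ?_, ?_⟩
      · rw [find_tag_end_go, altGo, if_neg hlt, if_neg hlt]
      · rw [hskip, find_tag_end_go, altGo, if_neg hlt, if_neg hlt]
      · rw [hskip1, find_tag_end_go, altGo, if_neg hlt, if_neg (by omega : ¬ pos + 1 < (cs.length : Int))]

-- ===== VERDICT =====
theorem find_tag_end_spec : Claim_equal_find_tag_end := by
  intro content start _ hpre
  unfold Spec_find_tag_end find_tag_end find_tag_end_alt
  exact (main_equiv content.toList (((content.toList.length : Int) - start).toNat) start hpre (le_refl _)).1
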